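-- pv_equiv track=rewrite | github.com/cdr30/SynthPro | create_synthpro_validation_data.py | calc_depth_bounds
-- ===== SOURCE A (Python) =====
-- def calc_depth_bounds(zthick):
--     """ Return depth coordinate bounds calculated from layer thicknesses """
--     bounds = []
--
--     for k in range(len(zthick)):
--
--         if k == 0:
--             bounds.append([0, zthick[k]])
--
--         else:
--             upper = bounds[k-1][1]
--             bounds.append([upper, upper + zthick[k]])
--
--     return bounds
-- ===== SOURCE B (Python) =====
-- def calc_depth_bounds(zthick):
--     """ Return depth coordinate bounds calculated from layer thicknesses """
--     n = len(zthick)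
--     if n == 0:
--         return []
--     if n == 1:
--         return [[0, zthick[0]]]
--     mid = n // 2
--     left = calc_depth_bounds(zthick[:mid])
--     right = calc_depth_bounds(zthick[mid:])
--     off = left[-1][1]
--     return left + [[b[0] + off, b[1] + off] for b in right]
-- ===== Notes on version B (the rewrite author's own statement) =====
-- stated objective: alternative
-- what changed: Replaced A's single index loop that reads the previously appended bound with a divide-and-conquer recursion: bounds of each half are computed independently and the right half's intervals are shifted by the left half's final depth.
import Mathlib
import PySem

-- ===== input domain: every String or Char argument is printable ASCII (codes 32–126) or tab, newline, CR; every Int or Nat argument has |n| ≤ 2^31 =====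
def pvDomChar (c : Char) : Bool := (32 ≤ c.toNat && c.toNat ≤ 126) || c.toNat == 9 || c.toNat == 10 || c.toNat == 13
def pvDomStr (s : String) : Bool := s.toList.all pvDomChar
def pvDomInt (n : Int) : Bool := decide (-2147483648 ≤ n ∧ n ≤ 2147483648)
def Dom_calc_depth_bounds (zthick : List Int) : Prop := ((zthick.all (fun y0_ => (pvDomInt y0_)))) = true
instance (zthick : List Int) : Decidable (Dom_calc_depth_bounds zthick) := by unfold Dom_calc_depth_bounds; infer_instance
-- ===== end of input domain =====

-- B replaces A's single index loop (which reads the previously appended bound) by a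
-- divide-and-conquer recursion: bounds of each half are computed independently and the
-- right half is shifted by the left half's final depth (objective: alternative).

-- ===== PORT A =====
-- literal port of A: index loop, each step reads bounds[k-1][1] from the list built so far
def calc_depth_bounds (zthick : List Int) : List (List Int) :=
  (PySem.List.pyRange 0 zthick.length 1).foldl
    (fun bounds k =>
      if k == 0 then
        bounds ++ [[0, (PySem.List.pyGet? zthick k).getD 0]]
      else
        let upper := (PySem.List.pyGet? ((PySem.List.pyGet? bounds (k - 1)).getD []) 1).getD 0
        bounds ++ [[upper, upper + (PySem.List.pyGet? zthick k).getD 0]])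
    []

-- ===== PORT B =====
-- port of B: divide and conquer — recurse on the two halves, shift the right half's
-- intervals by the left half's last upper depth left[-1][1]
def calc_depth_bounds_alt (zthick : List Int) : List (List Int) :=
  let n : Int := zthick.length
  if _h0 : n = 0 then []
  else if _h1 : n = 1 then [[0, (PySem.List.pyGet? zthick 0).getD 0]]
  else
    let mid : Int := PySem.Int.floordiv n 2
    let left := calc_depth_bounds_alt (PySem.List.slice zthick none (some mid))
    let right := calc_depth_bounds_alt (PySem.List.slice zthick (some mid) none)
    let off := (PySem.List.pyGet? ((PySem.List.pyGet? left (-1)).getD []) 1).getD 0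
    left ++ right.map (fun b =>
      [(PySem.List.pyGet? b 0).getD 0 + off, (PySem.List.pyGet? b 1).getD 0 + off])
termination_by zthick.length
decreasing_by
  · have hm : PySem.Int.floordiv ((zthick.length : Int)) 2 = ((zthick.length / 2 : Nat) : Int) :=
      PySem.Int.floordiv_natCast zthick.length 2
    rw [hm, PySem.List.slice_to_natCast]
    simp only [List.length_take]
    omega
  · have hm : PySem.Int.floordiv ((zthick.length : Int)) 2 = ((zthick.length / 2 : Nat) : Int) :=
      PySem.Int.floordiv_natCast zthick.length 2
    rw [hm, PySem.List.slice_from_natCast]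
    simp only [List.length_drop]
    omega

-- ===== PRECONDITION & SPEC =====
def Spec_calc_depth_bounds (zthick : List Int) (out : List (List Int)) : Prop := out = calc_depth_bounds_alt zthick
instance (zthick : List Int) (out : List (List Int)) : Decidable (Spec_calc_depth_bounds zthick out) := by unfold Spec_calc_depth_bounds; infer_instance

-- ===== CLAIM (what is proved, stated in full; the proofs are below) =====
def Claim_equal_calc_depth_bounds : Prop := ∀ (zthick : List Int), Dom_calc_depth_bounds zthick → Spec_calc_depth_bounds zthick (calc_depth_bounds zthick)

-- ===== LEMMAS AND PROOFS =====

-- common reference: the intended bounds list, one interval per thickness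
def pvGo (u : Int) : List Int → List (List Int)
  | [] => []
  | t :: ts => [u, u + t] :: pvGo (u + t) ts

theorem pvGo_ne_nil (u : Int) (t : Int) (ts : List Int) : pvGo u (t :: ts) ≠ [] := by
  simp [pvGo]

theorem pvGo_append_go (u : Int) (xs ys : List Int) :
    pvGo u (xs ++ ys) = pvGo u xs ++ pvGo (u + xs.sum) ys := by
  induction xs generalizing u with
  | nil => simp [pvGo]
  | cons t xs ih => simp [pvGo, ih, add_assoc]

theorem pvGo_shift (u off : Int) (ts : List Int) :
    (pvGo u ts).map (fun b =>
        [(PySem.List.pyGet? b 0).getD 0 + off, (PySem.List.pyGet? b 1).getD 0 + off])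
      = pvGo (u + off) ts := by
  induction ts generalizing u with
  | nil => simp [pvGo]
  | cons t ts ih =>
    simp only [pvGo, List.map_cons, ih]
    have h0 : PySem.List.pyGet? ([u, u + t] : List Int) 0 = some u := by
      simp [PySem.List.pyGet?, PySem.List.pyIdx?]
    have h1 : PySem.List.pyGet? ([u, u + t] : List Int) 1 = some (u + t) := by
      simp [PySem.List.pyGet?, PySem.List.pyIdx?]
    rw [h0, h1]
    simp only [Option.getD_some]
    rw [show u + t + off = u + off + t by ring]

theorem pvLast?_cons {α : Type} (a : α) (l : List α) (h : l ≠ []) :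
    (a :: l).getLast? = l.getLast? := by
  cases l with
  | nil => exact absurd rfl h
  | cons x xs => simp [List.getLast?_cons_cons]

theorem pvGo_last (u : Int) (ts : List Int) (h : ts ≠ []) :
    (PySem.List.pyGet? ((PySem.List.pyGet? (pvGo u ts) (-1)).getD []) 1).getD 0
      = u + ts.sum := by
  induction ts generalizing u with
  | nil => exact absurd rfl h
  | cons t ts ih =>
    cases ts with
    | nil =>
      simp [pvGo, PySem.List.pyGet?, PySem.List.pyIdx?]
    | cons t' ts' =>
      have hne : pvGo (u + t) (t' :: ts') ≠ [] := pvGo_ne_nil _ _ _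
      have ih' := ih (u + t) (by simp)
      rw [PySem.List.pyGet?_neg_one]
      rw [PySem.List.pyGet?_neg_one] at ih'
      have heq : (pvGo u (t :: t' :: ts')).getLast? = (pvGo (u + t) (t' :: ts')).getLast? := by
        simp only [pvGo]
        exact pvLast?_cons _ _ hne
      rw [heq, ih']
      simp [add_assoc]

theorem pvB_eq_aux : ∀ (n : Nat) (zs : List Int), zs.length ≤ n →
    calc_depth_bounds_alt zs = pvGo 0 zs := by
  intro n
  induction n with
  | zero =>
    intro zs hz
    have : zs = [] := List.eq_nil_of_length_eq_zero (Nat.le_zero.mp hz)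
    subst this
    rw [calc_depth_bounds_alt]
    simp [pvGo]
  | succ n ih =>
    intro zs hz
    rw [calc_depth_bounds_alt]
    by_cases h0 : (zs.length : Int) = 0
    · have : zs = [] := List.eq_nil_of_length_eq_zero (by exact_mod_cast h0)
      subst this; simp [pvGo]
    · by_cases h1 : (zs.length : Int) = 1
      · have hl1 : zs.length = 1 := by exact_mod_cast h1
        obtain ⟨t, ht⟩ := List.length_eq_one_iff.mp hl1
        subst ht
        simp [pvGo, PySem.List.pyGet?, PySem.List.pyIdx?]
      · simp only [h0, h1, dite_false]
        have hlen2 : 2 ≤ zs.length := by omega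
        have hm : PySem.Int.floordiv ((zs.length : Int)) 2 = ((zs.length / 2 : Nat) : Int) :=
          PySem.Int.floordiv_natCast zs.length 2
        set m : Nat := zs.length / 2 with hmdef
        have hm1 : 1 ≤ m := by omega
        have hmlt : m < zs.length := by omega
        rw [hm, PySem.List.slice_to_natCast, PySem.List.slice_from_natCast]
        have hltake : (zs.take m).length = m := by simp; omega
        have hldrop : (zs.drop m).length = zs.length - m := by simp
        rw [ih (zs.take m) (by omega), ih (zs.drop m) (by omega)]
        have htne : zs.take m ≠ [] := by
          intro hcon
          have := congrArg List.length hcon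
          simp [hltake] at this; omega
        rw [pvGo_last 0 (zs.take m) htne, pvGo_shift]
        have := pvGo_append_go 0 (zs.take m) (zs.drop m)
        rw [List.take_append_drop] at this
        rw [this]
        simp

theorem pvB_eq (zthick : List Int) : calc_depth_bounds_alt zthick = pvGo 0 zthick :=
  pvB_eq_aux zthick.length zthick (le_refl _)

theorem pvGo_length (u : Int) (ts : List Int) : (pvGo u ts).length = ts.length := by
  induction ts generalizing u with
  | nil => simp [pvGo]
  | cons t ts ih => simp [pvGo, ih]

theorem pvGo_getElem? (ts : List Int) (u : Int) (k : Nat) (hk : k < ts.length) :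
    (pvGo u ts)[k]? = some [u + (ts.take k).sum, u + (ts.take (k+1)).sum] := by
  induction ts generalizing u k with
  | nil => simp at hk
  | cons t ts ih =>
    cases k with
    | zero => simp [pvGo]
    | succ k =>
      have hk' : k < ts.length := by simpa using hk
      simpa [pvGo, add_assoc] using ih (u + t) k hk'

theorem pvGo_append (u : Int) (ts : List Int) (t : Int) :
    pvGo u (ts ++ [t]) = pvGo u ts ++ [[u + ts.sum, u + ts.sum + t]] := by
  induction ts generalizing u with
  | nil => simp [pvGo]
  | cons a ts ih => simp [pvGo, ih, add_assoc]

theorem pvA_loop (zthick : List Int) (n : Nat) (hn : n ≤ zthick.length) :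
    (PySem.List.pyRange 0 n 1).foldl
      (fun bounds k =>
        if k == 0 then
          bounds ++ [[0, (PySem.List.pyGet? zthick k).getD 0]]
        else
          let upper := (PySem.List.pyGet? ((PySem.List.pyGet? bounds (k - 1)).getD []) 1).getD 0
          bounds ++ [[upper, upper + (PySem.List.pyGet? zthick k).getD 0]])
      [] = pvGo 0 (zthick.take n) := by
  induction n with
  | zero => simp [PySem.List.pyRange_one_eq_nil, pvGo]
  | succ n ih =>
    have hn' : n ≤ zthick.length := Nat.le_of_succ_le hn
    have hlt : n < zthick.length := hn
    rw [show ((n+1 : Nat) : Int) = (n : Int) + 1 by push_cast; ring] at *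
    rw [PySem.List.pyRange_one_succ_right (by positivity), List.foldl_append, ih hn']
    have hget : PySem.List.pyGet? zthick (n : Int) = some zthick[n] := by
      simp [hlt]
    have htake : zthick.take (n+1) = zthick.take n ++ [zthick[n]] := by
      rw [List.take_add_one]; simp [hlt]
    by_cases h0 : n = 0
    · subst h0
      simp [List.foldl_cons, htake, pvGo, hlt]
    · have hne : ((n : Int) == 0) = false := by
        simp; omega
      simp only [List.foldl_cons, List.foldl_nil, hne, Bool.false_eq_true, if_false]
      have hidx : (n : Int) - 1 = ((n - 1 : Nat) : Int) := by omega
      have hlen : n - 1 < (zthick.take n).length := by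
        simp [Nat.min_eq_left hn']; omega
      have hb : PySem.List.pyGet? (pvGo 0 (zthick.take n)) ((n : Int) - 1)
          = some [0 + ((zthick.take n).take (n-1)).sum, 0 + ((zthick.take n).take (n-1+1)).sum] := by
        rw [hidx, PySem.List.pyGet?_natCast]
        rw [pvGo_getElem? _ 0 (n-1) (by simpa [pvGo_length, Nat.min_eq_left hn'] using hlen)]
      have hsimp : (zthick.take n).take (n-1+1) = zthick.take n := by
        rw [List.take_take]; congr 1; omega
      have h2 : ∀ a b : Int, (PySem.List.pyGet? [a, b] 1).getD 0 = b := by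
        intro a b; simp [PySem.List.pyGet?, PySem.List.pyIdx?]
      rw [hb]
      simp only [Option.getD_some, h2, hget, htake, pvGo_append, hsimp]

-- ===== VERDICT (by name: the statement is the Claim_ definition above) =====
theorem calc_depth_bounds_spec : Claim_equal_calc_depth_bounds := by
  intro zthick _
  unfold Spec_calc_depth_bounds
  rw [pvB_eq]
  unfold calc_depth_bounds
  have := pvA_loop zthick zthick.length (le_refl _)
  simpa using this
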